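-- pv_equiv track=rewrite | github.com/METResearchGroup/bluesky-research | pipelines/backfill_records_coordination/create_chunked_backfill_commands.py | generate_start_end_dates_for_chunk
-- ===== SOURCE A (Python) =====
-- def generate_start_end_dates_for_chunk(
--     partition_dates: list[str], chunk_size: int
-- ) -> list[tuple[str, str]]:
--     """Generate start and end dates for a chunk of partition dates."""
--     res: list[tuple[str, str]] = []
--     for i in range(0, len(partition_dates), chunk_size):
--         max_index = min(i + chunk_size - 1, len(partition_dates) - 1)
--         res.append((partition_dates[i], partition_dates[max_index]))
--     return res
-- ===== SOURCE B (Python) =====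
-- def generate_start_end_dates_for_chunk(
--     partition_dates: list[str], chunk_size: int
-- ) -> list[tuple[str, str]]:
--     """Generate start and end dates for a chunk of partition dates."""
--     if chunk_size < 1:
--         return []
--     res: list[tuple[str, str]] = []
--     for i, date in enumerate(partition_dates):
--         if i % chunk_size == 0:
--             res.append((date, date))
--         else:
--             res[-1] = (res[-1][0], date)
--     return res
-- ===== Notes on version B (the rewrite author's own statement) =====
-- stated objective: alternative
-- what changed: B replaces A's stride-indexed pass (range(0,len,chunk_size) with min(i+chunk_size-1,len-1) random access) by a single streaming pass over the values with enumerate, opening a new (date,date) pair at each chunk boundary i % chunk_size == 0 and otherwise overwriting the current pair's end; no indexing into the input list at all.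
import Mathlib
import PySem

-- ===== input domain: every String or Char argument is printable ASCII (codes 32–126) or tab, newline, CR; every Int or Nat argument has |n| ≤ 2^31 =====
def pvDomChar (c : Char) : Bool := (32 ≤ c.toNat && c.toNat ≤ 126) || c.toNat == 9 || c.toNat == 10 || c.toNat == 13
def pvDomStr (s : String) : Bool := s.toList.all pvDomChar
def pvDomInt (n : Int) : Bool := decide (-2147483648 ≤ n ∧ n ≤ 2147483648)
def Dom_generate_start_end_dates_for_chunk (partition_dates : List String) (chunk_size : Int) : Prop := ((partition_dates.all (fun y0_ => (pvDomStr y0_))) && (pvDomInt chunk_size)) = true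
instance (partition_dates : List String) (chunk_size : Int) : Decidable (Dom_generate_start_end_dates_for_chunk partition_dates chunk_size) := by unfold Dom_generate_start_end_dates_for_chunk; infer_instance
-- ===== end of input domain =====

-- B replaces A's stride-indexed pass (range(0, len, chunk_size) + min index arithmetic) by one
-- streaming pass over the values with enumerate: open a new (date, date) pair at each chunk
-- boundary i % chunk_size == 0, otherwise overwrite the current pair's end; same cost.
-- Pre_ excludes chunk_size = 0, where range(0, n, 0) raises ValueError in A.

-- ===== PORT A =====
-- Indexing ported with pyGetD: within the loop both indices are always in range
-- (i ∈ range(0, len, chunk_size) and 0 ≤ max_index < len), so Python never raises IndexError there.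
def generate_start_end_dates_for_chunk (partition_dates : List String) (chunk_size : Int) : List (String × String) :=
  (PySem.List.pyRange 0 partition_dates.length chunk_size).foldl
    (fun res i =>
      let max_index := min (i + chunk_size - 1) ((partition_dates.length : Int) - 1)
      res ++ [(PySem.List.pyGetD partition_dates i "", PySem.List.pyGetD partition_dates max_index "")])
    []

-- ===== PORT B =====
-- res[-1] is ported with pyGetD; the else-branch only runs with res nonempty (index 0 always
-- takes the i % chunk_size == 0 branch), so Python's res[-1] never raises there.
-- The assignment res[-1] = (res[-1][0], date) is ported as dropLast ++ [new last].
def generate_start_end_dates_for_chunk_alt (partition_dates : List String) (chunk_size : Int) : List (String × String) :=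
  if chunk_size < 1 then []
  else
    (PySem.List.enumerate partition_dates 0).foldl
      (fun res p =>
        if PySem.Int.mod p.1 chunk_size = 0 then
          res ++ [(p.2, p.2)]
        else
          res.dropLast ++ [((PySem.List.pyGetD res (-1) ("", "")).1, p.2)])
      []

-- ===== PRECONDITION & SPEC =====
-- chunk_size = 0 makes range(0, n, 0) raise ValueError in A; excluded.
def Pre_generate_start_end_dates_for_chunk (partition_dates : List String) (chunk_size : Int) : Prop := chunk_size ≠ 0
instance (partition_dates : List String) (chunk_size : Int) : Decidable (Pre_generate_start_end_dates_for_chunk partition_dates chunk_size) := by unfold Pre_generate_start_end_dates_for_chunk; infer_instance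
def pvWitness_generate_start_end_dates_for_chunk : List String × Int := (["2024-01-01", "2024-01-02", "2024-01-03"], 2)
def Spec_generate_start_end_dates_for_chunk (partition_dates : List String) (chunk_size : Int) (out : List (String × String)) : Prop := out = generate_start_end_dates_for_chunk_alt partition_dates chunk_size
instance (partition_dates : List String) (chunk_size : Int) (out : List (String × String)) : Decidable (Spec_generate_start_end_dates_for_chunk partition_dates chunk_size out) := by unfold Spec_generate_start_end_dates_for_chunk; infer_instance

-- ===== CLAIM (what is proved, stated in full; the proofs are below) =====
def Claim_equal_generate_start_end_dates_for_chunk : Prop := ∀ (partition_dates : List String) (chunk_size : Int), Dom_generate_start_end_dates_for_chunk partition_dates chunk_size → Pre_generate_start_end_dates_for_chunk partition_dates chunk_size → Spec_generate_start_end_dates_for_chunk partition_dates chunk_size (generate_start_end_dates_for_chunk partition_dates chunk_size)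

-- ===== LEMMAS AND PROOFS =====

-- Reference value: the chunk endpoints, one chunk (head + up to k more elements) at a time.
def pvChunks (k : Nat) : List String → List (String × String)
  | [] => []
  | d :: rest => (d, (rest.take k).getLastD d) :: pvChunks k (rest.drop k)
termination_by l => l.length
decreasing_by simp

theorem pv_mod_pos (a cs : Int) (hcs : 0 < cs) : PySem.Int.mod a cs = a % cs := by
  unfold PySem.Int.mod
  rw [Int.fmod_eq_emod, if_pos (Or.inl (by omega))]
  omega

theorem pvRange_nil (b cs : Int) (hcs : 0 < cs) (hb : b ≤ 0) :
    PySem.List.pyRange 0 b cs = [] := by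
  rw [PySem.List.pyRange_of_pos _ _ hcs, if_neg (by omega)]
  simp

theorem pvRange_cons (b cs : Int) (hcs : 0 < cs) (hb : 0 < b) :
    PySem.List.pyRange 0 b cs = 0 :: (PySem.List.pyRange 0 (b - cs) cs).map (· + cs) := by
  rw [PySem.List.pyRange_of_pos _ _ hcs, PySem.List.pyRange_of_pos _ _ hcs, if_pos hb]
  have key : ((b - 0 + cs - 1) / cs).toNat
      = (if (0:Int) < b - cs then ((b - cs - 0 + cs - 1) / cs).toNat else 0) + 1 := by
    split
    · rename_i hlt
      have h1 : b - 0 + cs - 1 = (b - cs - 0 + cs - 1) + 1 * cs := by ring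
      have h2 : (0:Int) ≤ (b - cs - 0 + cs - 1) / cs := Int.ediv_nonneg (by omega) (by omega)
      rw [h1, Int.add_mul_ediv_right _ _ (by omega : cs ≠ 0)]
      omega
    · rename_i hge
      have hle : 1 ≤ (b - 0 + cs - 1) / cs := by
        rw [Int.le_ediv_iff_mul_le hcs]; omega
      have hlt2 : (b - 0 + cs - 1) / cs < 2 := by
        rw [Int.ediv_lt_iff_lt_mul hcs]; omega
      omega
  rw [key, List.range_succ_eq_map]
  simp only [List.map_cons, List.map_map]
  refine congrArg₂ _ (by simp) ?_
  apply List.map_congr_left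
  intro x _
  simp [Function.comp]
  ring

-- getLastD of a taken prefix, as a total getD lookup into the cons list.
theorem pv_take_getLastD {α : Type} (d e : α) (rest : List α) (k : Nat) :
    (rest.take k).getLastD d = (d :: rest).getD (min k rest.length) e := by
  induction rest generalizing d k with
  | nil => simp
  | cons x xs ih =>
    cases k with
    | zero => simp
    | succ k =>
      simp only [List.take_succ_cons, List.getLastD_cons]
      have hidx : min (k + 1) (x :: xs).length = min k xs.length + 1 := by
        simp only [List.length_cons]; omega
      rw [hidx, List.getD_cons_succ]
      exact ih x k

-- A's map over range(0, n, cs) computes pvChunks.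
theorem pvA_chunks (cs : Int) (hcs : 0 < cs) :
    ∀ (N : Nat) (pd : List String), pd.length ≤ N →
      (PySem.List.pyRange 0 pd.length cs).map
        (fun i => (PySem.List.pyGetD pd i "", PySem.List.pyGetD pd (min (i + cs - 1) ((pd.length : Int) - 1)) ""))
      = pvChunks (cs.toNat - 1) pd := by
  intro N
  induction N with
  | zero =>
    intro pd hpd
    have : pd = [] := by cases pd <;> simp_all
    subst this
    simp only [List.length_nil, Nat.cast_zero, pvRange_nil 0 cs hcs le_rfl, List.map_nil]
    rw [pvChunks]
  | succ N ih =>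
    intro pd hpd
    match pd with
    | [] =>
      simp only [List.length_nil, Nat.cast_zero, pvRange_nil 0 cs hcs le_rfl, List.map_nil]
      rw [pvChunks]
    | d :: rest =>
      have hcst : (cs.toNat : Int) = cs := Int.toNat_of_nonneg (by omega)
      have hn : (0:Int) < ((d :: rest).length : Int) := by simp
      rw [pvRange_cons _ _ hcs hn, List.map_cons, List.map_map]
      have hhead : (PySem.List.pyGetD (d :: rest) 0 "",
          PySem.List.pyGetD (d :: rest) (min (0 + cs - 1) (((d :: rest).length : Int) - 1)) "")
          = (d, (rest.take (cs.toNat - 1)).getLastD d) := by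
        have h0 : PySem.List.pyGetD (d :: rest) 0 "" = d := by
          rw [PySem.List.pyGetD_zero]; simp
        have hm0 : (0:Int) ≤ min (0 + cs - 1) (((d :: rest).length : Int) - 1) := by
          simp only [List.length_cons]; push_cast; omega
        have hm : (min (0 + cs - 1) (((d :: rest).length : Int) - 1)).toNat
            = min (cs.toNat - 1) rest.length := by
          simp only [List.length_cons]; push_cast; omega
        rw [h0, PySem.List.pyGetD_of_nonneg _ _ hm0, hm,
          ← pv_take_getLastD d "" rest (cs.toNat - 1)]
      rw [hhead]
      have htail : (PySem.List.pyRange 0 (((d :: rest).length : Int) - cs) cs).map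
          ((fun i => (PySem.List.pyGetD (d :: rest) i "",
            PySem.List.pyGetD (d :: rest) (min (i + cs - 1) (((d :: rest).length : Int) - 1)) "")) ∘ (· + cs))
          = pvChunks (cs.toNat - 1) (rest.drop (cs.toNat - 1)) := by
        rw [← ih (rest.drop (cs.toNat - 1)) (by simp [List.length_drop]; simp at hpd; omega)]
        by_cases hcn : cs ≤ ((d :: rest).length : Int)
        · have hlen : ((rest.drop (cs.toNat - 1)).length : Int) = ((d :: rest).length : Int) - cs := by
            simp only [List.length_drop, List.length_cons]
            simp only [List.length_cons] at hcn
            push_cast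
            omega
          rw [hlen]
          apply List.map_congr_left
          intro i hi
          rw [PySem.List.mem_pyRange_iff_of_pos hcs] at hi
          obtain ⟨hi0, hi1, -⟩ := hi
          simp only [Function.comp]
          have e1 : PySem.List.pyGetD (d :: rest) (i + cs) ""
              = PySem.List.pyGetD (rest.drop (cs.toNat - 1)) i "" := by
            rw [PySem.List.pyGetD_of_nonneg _ _ (by omega), PySem.List.pyGetD_of_nonneg _ _ hi0]
            have hidx : (i + cs).toNat = (cs.toNat - 1 + i.toNat) + 1 := by omega
            rw [hidx, List.getD_cons_succ]
            induction' hd : rest.drop (cs.toNat - 1) with z zs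
            · simp [List.getD]
              rw [List.getElem?_eq_none]
              · rfl
              · have := congrArg List.length hd
                simp [List.length_drop] at this
                simp only [List.length_cons] at hi1 hlen hcn
                omega
            · -- general: getD of drop via getElem?_drop
              rw [← hd]
              simp only [List.getD, List.getElem?_drop]
          have e2 : PySem.List.pyGetD (d :: rest) (min (i + cs + cs - 1) (((d :: rest).length : Int) - 1)) ""
              = PySem.List.pyGetD (rest.drop (cs.toNat - 1))
                  (min (i + cs - 1) (((d :: rest).length : Int) - cs - 1)) "" := by
            simp only [List.length_cons] at hi1 hcn ⊢
            rw [PySem.List.pyGetD_of_nonneg _ _ (by push_cast; omega),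
              PySem.List.pyGetD_of_nonneg _ _ (by push_cast at hi1 hcn ⊢; omega)]
            push_cast
            have hidx : (min (i + cs + cs - 1) (((rest.length : Int) + 1) - 1)).toNat
                = (cs.toNat - 1 + (min (i + cs - 1) (((rest.length : Int) + 1) - cs - 1)).toNat) + 1 := by
              push_cast at hi1 hcn ⊢; omega
            rw [hidx, List.getD_cons_succ]
            simp only [List.getD, List.getElem?_drop]
          rw [show i + cs + cs - 1 = (i + cs) + cs - 1 by ring] at e2
          rw [e1, ← e2]
        · have h1 : ((d :: rest).length : Int) - cs ≤ 0 := by omega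
          have h2 : rest.drop (cs.toNat - 1) = [] := by
            apply List.drop_eq_nil_of_le
            simp only [List.length_cons] at hcn
            omega
          rw [pvRange_nil _ _ hcs h1, h2]
          simp [pvRange_nil 0 cs hcs le_rfl]
      rw [htail]
      conv_rhs => rw [pvChunks]

-- B's inner steps: inside one chunk (indices j+t … with j a multiple of cs, 1 ≤ t,
-- never reaching the next boundary) each step overwrites the end of the last pair.
theorem pvB_inner (cs : Int) (hcs : 0 < cs) (j : Int) (hj : cs ∣ j) :
    ∀ (ys : List String) (t : Int) (acc0 : List (String × String)) (a b : String),
      1 ≤ t → t + ys.length ≤ cs →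
      (PySem.List.enumerate ys (j + t)).foldl
        (fun res p =>
          if PySem.Int.mod p.1 cs = 0 then res ++ [(p.2, p.2)]
          else res.dropLast ++ [((PySem.List.pyGetD res (-1) ("", "")).1, p.2)])
        (acc0 ++ [(a, b)])
      = acc0 ++ [(a, ys.getLastD b)] := by
  intro ys
  induction ys with
  | nil => intro t acc0 a b _ _; simp [PySem.List.enumerate]
  | cons y ys ih =>
    intro t acc0 a b ht htc
    simp only [List.length_cons] at htc
    have hcons : PySem.List.enumerate (y :: ys) (j + t) = (j + t, y) :: PySem.List.enumerate ys (j + t + 1) := by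
      simp [PySem.List.enumerate]
    rw [hcons, List.foldl_cons]
    have hmod : ¬ PySem.Int.mod (j + t) cs = 0 := by
      obtain ⟨q, hq⟩ := hj
      rw [pv_mod_pos _ _ hcs, hq, show cs * q + t = t + cs * q by ring,
        Int.add_mul_emod_self_left, Int.emod_eq_of_lt (by omega) (by push_cast at htc; omega)]
      omega
    rw [if_neg hmod, List.dropLast_concat,
      PySem.List.pyGetD_neg_one _ _ (by simp), List.getLast_concat]
    rw [show j + t + 1 = j + (t + 1) by ring]
    rw [ih (t + 1) acc0 a y (by omega) (by push_cast at htc ⊢; omega)]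
    rw [List.getLastD_cons]

-- B's fold, started at any chunk boundary, appends pvChunks.
theorem pvB_outer (cs : Int) (hcs : 0 < cs) :
    ∀ (N : Nat) (pd : List String), pd.length ≤ N →
      ∀ (acc : List (String × String)) (j : Int), cs ∣ j →
      (PySem.List.enumerate pd j).foldl
        (fun res p =>
          if PySem.Int.mod p.1 cs = 0 then res ++ [(p.2, p.2)]
          else res.dropLast ++ [((PySem.List.pyGetD res (-1) ("", "")).1, p.2)])
        acc
      = acc ++ pvChunks (cs.toNat - 1) pd := by
  intro N
  induction N with
  | zero =>
    intro pd hpd acc j hj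
    have : pd = [] := by cases pd <;> simp_all
    subst this
    rw [pvChunks]
    simp [PySem.List.enumerate]
  | succ N ih =>
    intro pd hpd acc j hj
    match pd with
    | [] =>
      rw [pvChunks]
      simp [PySem.List.enumerate]
    | d :: rest =>
      have hcst : (cs.toNat : Int) = cs := Int.toNat_of_nonneg (by omega)
      have hcons : PySem.List.enumerate (d :: rest) j = (j, d) :: PySem.List.enumerate rest (j + 1) := by
        simp [PySem.List.enumerate]
      rw [hcons, List.foldl_cons]
      have hmod : PySem.Int.mod j cs = 0 := by
        rw [pv_mod_pos _ _ hcs]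
        exact Int.emod_eq_zero_of_dvd hj
      rw [if_pos hmod]
      have hsplit : rest = rest.take (cs.toNat - 1) ++ rest.drop (cs.toNat - 1) :=
        (List.take_append_drop _ rest).symm
      conv_lhs => rw [hsplit]
      rw [PySem.List.enumerate_append, List.foldl_append,
        pvB_inner cs hcs j hj (rest.take (cs.toNat - 1)) 1 acc d d le_rfl
          (by simp [List.length_take]; omega)]
      by_cases hrest : rest.length ≤ cs.toNat - 1
      · rw [List.drop_eq_nil_of_le hrest]
        simp only [PySem.List.enumerate, List.foldl_nil]
        conv_rhs => rw [pvChunks]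
        rw [List.drop_eq_nil_of_le hrest, pvChunks]
      · have hlen : ((rest.take (cs.toNat - 1)).length : Int) = cs - 1 := by
          simp [List.length_take]; omega
        have hdvd : cs ∣ (j + 1 + ((rest.take (cs.toNat - 1)).length : Int)) := by
          rw [hlen, show j + 1 + (cs - 1) = j + cs by ring]
          exact dvd_add hj dvd_rfl
        rw [ih (rest.drop (cs.toNat - 1)) (by simp [List.length_drop]; simp at hpd; omega) _ _ hdvd]
        conv_rhs => rw [pvChunks]
        simp

-- ===== VERDICT (by name: the statement is the Claim_ definition above) =====
theorem generate_start_end_dates_for_chunk_spec : Claim_equal_generate_start_end_dates_for_chunk := by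
  intro pd cs _ hpre
  unfold Spec_generate_start_end_dates_for_chunk generate_start_end_dates_for_chunk
    generate_start_end_dates_for_chunk_alt
  rcases lt_trichotomy cs 0 with hneg | hz | hpos
  · rw [PySem.List.pyRange_of_neg _ _ hneg, if_pos (by omega : cs < 1)]
    simp [show ¬((pd.length : Int) < 0) from by omega]
  · exact absurd hz hpre
  · rw [if_neg (by omega : ¬ cs < 1),
      PySem.List.foldl_append_singleton_eq_map
        (fun i => (PySem.List.pyGetD pd i "", PySem.List.pyGetD pd (min (i + cs - 1) ((pd.length : Int) - 1)) ""))]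
    rw [List.nil_append, pvA_chunks cs hpos pd.length pd le_rfl,
      pvB_outer cs hpos pd.length pd le_rfl [] 0 (dvd_zero cs)]
    rw [List.nil_append]
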